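-- pv_equiv track=rewrite | github.com/Stereo101/squareListFinder | hamiltonian.py | generateSquareGraph
-- ===== SOURCE A (Python) =====
-- def generateSquareGraph(n):
-- 	#Generate List of Squares less than n
-- 	squares = []
-- 	i = 1
-- 	while(i**2 <= 2*n):
-- 		squares.append(i**2)
-- 		i += 1
--
-- 	graphDict = {}
--
-- 	for i in range(1,n+1):
-- 		l = []
-- 		for s in squares:
-- 			if(s > i and s-i <= n and s-i != i):
-- 				l.append(s-i)
-- 		graphDict[i] = set(l)
-- 	return graphDict
-- ===== SOURCE B (Python) =====
-- def generateSquareGraph(n):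
-- 	graph = {i: set() for i in range(1, n + 1)}
-- 	k = 1
-- 	while k * k <= 2 * n:
-- 		s = k * k
-- 		for i in range(max(1, s - n), min(n, s - 1) + 1):
-- 			if s - i != i:
-- 				graph[i].add(s - i)
-- 		k += 1
-- 	return graph
-- ===== Notes on version B (the rewrite author's own statement) =====
-- stated objective: alternative
-- what changed: A is node-centric (precompute all squares, then for each node filter the square list); B is edge-centric: it pre-creates every node's empty set, then iterates over the squares s and, for each s, writes j = s - i into the set of every i in the valid window, so the per-node filtering scan disappears.
import Mathlib
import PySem

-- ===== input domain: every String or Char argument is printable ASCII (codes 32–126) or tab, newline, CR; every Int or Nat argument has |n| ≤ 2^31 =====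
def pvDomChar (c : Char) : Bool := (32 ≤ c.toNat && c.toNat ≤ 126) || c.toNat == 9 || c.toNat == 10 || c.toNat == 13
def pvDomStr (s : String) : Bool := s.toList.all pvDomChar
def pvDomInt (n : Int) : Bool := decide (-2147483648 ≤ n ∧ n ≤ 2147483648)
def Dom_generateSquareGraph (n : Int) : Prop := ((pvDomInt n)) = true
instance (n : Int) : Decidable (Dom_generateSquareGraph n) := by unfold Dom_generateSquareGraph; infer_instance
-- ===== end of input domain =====

-- B is edge-centric: instead of A's per-node filtering of a precomputed square list, it iterates
-- over the squares s and writes j = s - i into the set of every node i in the valid window.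

-- termination helper for the while loops (cited by decreasing_by)
theorem pv_le_mul_self (i : Int) : i ≤ i * i := by
  nlinarith [mul_self_nonneg i, mul_self_nonneg (i - 1)]

-- ===== PORT A =====
-- 'while i**2 <= 2*n: squares.append(i**2); i += 1'
def pvSquaresLoop (n i : Int) : List Int :=
  if _h : i * i ≤ 2 * n then i * i :: pvSquaresLoop n (i + 1) else []
termination_by (2 * n + 1 - i).toNat
decreasing_by have := pv_le_mul_self i; omega

def generateSquareGraph (n : Int) : List (Int × List Int) :=
  let squares := pvSquaresLoop n 1
  ((PySem.List.pyRange 1 (n + 1) 1).foldl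
    (fun d i =>
      let l := squares.foldl
        (fun l s => if s > i ∧ s - i ≤ n ∧ s - i ≠ i then l ++ [s - i] else l) []
      d.insert i (PySem.Set.ofList l))
    PySem.Dict.empty).items

-- ===== PORT B =====
-- 'while k*k <= 2*n: for i in range(max(1, s-n), min(n, s-1)+1): if s-i != i: graph[i].add(s-i); k += 1'
def pvFill (n k : Int) (d : PySem.Dict Int (PySem.Set Int)) : PySem.Dict Int (PySem.Set Int) :=
  if _h : k * k ≤ 2 * n then
    pvFill n (k + 1)
      ((PySem.List.pyRange (max 1 (k * k - n)) (min n (k * k - 1) + 1) 1).foldl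
        (fun d i =>
          if _g : k * k - i ≠ i then
            d.modify i PySem.Set.empty (fun s => PySem.Set.add s (k * k - i))
          else d) d)
  else d
termination_by (2 * n + 1 - k).toNat
decreasing_by have := pv_le_mul_self k; omega

-- 'graph = {i: set() for i in range(1, n+1)}', then the fill loop
def generateSquareGraph_alt (n : Int) : List (Int × List Int) :=
  (pvFill n 1
    ((PySem.List.pyRange 1 (n + 1) 1).foldl
      (fun d i => d.insert i PySem.Set.empty) PySem.Dict.empty)).items

-- ===== PRECONDITION & SPEC =====
def Spec_generateSquareGraph (n : Int) (out : List (Int × List Int)) : Prop := out = generateSquareGraph_alt n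
instance (n : Int) (out : List (Int × List Int)) : Decidable (Spec_generateSquareGraph n out) := by unfold Spec_generateSquareGraph; infer_instance

-- ===== CLAIM (what is proved, stated in full; the proofs are below) =====
def Claim_equal_generateSquareGraph : Prop := ∀ (n : Int), Dom_generateSquareGraph n → Spec_generateSquareGraph n (generateSquareGraph n)

-- ===== LEMMAS AND PROOFS =====

theorem pv_sq_lt (a b : Int) (h0 : 0 ≤ a) (h : a < b) : a * a < b * b := by nlinarith

theorem pv_sq_le (a b : Int) (h0 : 0 ≤ a) (h : a ≤ b) : a * a ≤ b * b := by nlinarith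

theorem mem_pvSquaresLoop (n i : Int) (s : Int) (hi : 1 ≤ i) :
    s ∈ pvSquaresLoop n i ↔ ∃ k, i ≤ k ∧ s = k * k ∧ k * k ≤ 2 * n := by
  induction i using pvSquaresLoop.induct n with
  | case1 i h ih =>
    rw [pvSquaresLoop, dif_pos h, List.mem_cons]
    constructor
    · rintro (rfl | hs)
      · exact ⟨i, le_refl _, rfl, h⟩
      · obtain ⟨k, hk1, hk2, hk3⟩ := (ih (by omega)).mp hs
        exact ⟨k, by omega, hk2, hk3⟩
    · rintro ⟨k, hk1, rfl, hk3⟩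
      rcases eq_or_lt_of_le hk1 with rfl | hk
      · exact Or.inl rfl
      · exact Or.inr ((ih (by omega)).mpr ⟨k, by omega, rfl, hk3⟩)
  | case2 i h =>
    rw [pvSquaresLoop, dif_neg h]
    simp only [List.not_mem_nil, false_iff]
    rintro ⟨k, hk1, rfl, hk3⟩
    exact h (le_trans (pv_sq_le i k (by omega) hk1) hk3)

theorem pairwise_pvSquaresLoop (n i : Int) (hi : 1 ≤ i) :
    (pvSquaresLoop n i).Pairwise (· < ·) := by
  induction i using pvSquaresLoop.induct n with
  | case1 i h ih =>
    rw [pvSquaresLoop, dif_pos h]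
    refine List.Pairwise.cons ?_ (ih (by omega))
    intro s hs
    obtain ⟨k, hk1, rfl, _⟩ := (mem_pvSquaresLoop n (i + 1) s (by omega)).mp hs
    exact pv_sq_lt i k (by omega) (by omega)
  | case2 i h => rw [pvSquaresLoop, dif_neg h]; exact List.Pairwise.nil

-- generic: an append-if loop is a filter+map
theorem pv_foldl_append_ite {α β : Type} (P : α → Prop) [DecidablePred P] (f : α → β) :
    ∀ (xs : List α) (acc : List β),
      xs.foldl (fun l s => if P s then l ++ [f s] else l) acc
        = acc ++ (xs.filter (fun s => decide (P s))).map f := by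
  intro xs
  induction xs with
  | nil => simp
  | cons x xs ih =>
    intro acc
    by_cases h : P x <;> simp [h, ih, List.append_assoc]

-- the inner append-loop of A, as a filter-map
theorem innerA_eq (n i : Int) :
    (pvSquaresLoop n 1).foldl
      (fun l s => if s > i ∧ s - i ≤ n ∧ s - i ≠ i then l ++ [s - i] else l) []
    = ((pvSquaresLoop n 1).filter (fun s => decide (s > i ∧ s - i ≤ n ∧ s - i ≠ i))).map
        (fun s => s - i) := by
  exact pv_foldl_append_ite _ _ _ []

theorem pairwise_innerA (n i : Int) :
    (((pvSquaresLoop n 1).filter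
        (fun s => decide (s > i ∧ s - i ≤ n ∧ s - i ≠ i))).map (fun s => s - i)).Pairwise
      (· < ·) := by
  refine List.Pairwise.map _ (fun a b h => ?_)
    ((pairwise_pvSquaresLoop n 1 (le_refl _)).filter _)
  omega

-- two strictly increasing Int lists with the same members are equal
theorem eq_of_pairwise_lt_of_mem_iff (xs ys : List Int)
    (hx : xs.Pairwise (· < ·)) (hy : ys.Pairwise (· < ·))
    (h : ∀ a, a ∈ xs ↔ a ∈ ys) : xs = ys := by
  have hnx : xs.Nodup := hx.imp (fun h => ne_of_lt h)
  have hny : ys.Nodup := hy.imp (fun h => ne_of_lt h)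
  have hperm : xs.Perm ys := (List.perm_ext_iff_of_nodup hnx hny).mpr h
  exact List.Perm.eq_of_pairwise (fun a b _ _ hab hba => (lt_asymm hab hba).elim) hx hy hperm

-- the j-values pvFill writes into node i's set, in generation order
def pvJs (n k i : Int) : List Int :=
  if _h : k * k ≤ 2 * n then
    (if max 1 (k * k - n) ≤ i ∧ i < min n (k * k - 1) + 1 ∧ k * k - i ≠ i
      then [k * k - i] else []) ++ pvJs n (k + 1) i
  else []
termination_by (2 * n + 1 - k).toNat
decreasing_by have := pv_le_mul_self k; omega

theorem mem_pvJs (n k i x : Int) (hk : 1 ≤ k) :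
    x ∈ pvJs n k i ↔ ∃ m, k ≤ m ∧ m * m ≤ 2 * n ∧
      (max 1 (m * m - n) ≤ i ∧ i < min n (m * m - 1) + 1 ∧ m * m - i ≠ i) ∧ x = m * m - i := by
  induction k using pvJs.induct n with
  | case1 k h ih =>
    rw [pvJs, dif_pos h, List.mem_append]
    constructor
    · rintro (hx | hx)
      · rw [List.mem_ite_nil_right, List.mem_singleton] at hx
        exact ⟨k, le_refl _, h, hx.1, hx.2⟩
      · obtain ⟨m, hm1, hm2, hm3, hm4⟩ := (ih (by omega)).mp hx
        exact ⟨m, by omega, hm2, hm3, hm4⟩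
    · rintro ⟨m, hm1, hm2, hm3, rfl⟩
      rcases eq_or_lt_of_le hm1 with rfl | hm
      · exact Or.inl (by rw [List.mem_ite_nil_right, List.mem_singleton]; exact ⟨hm3, rfl⟩)
      · exact Or.inr ((ih (by omega)).mpr ⟨m, by omega, hm2, hm3, rfl⟩)
  | case2 k h =>
    rw [pvJs, dif_neg h]
    simp only [List.not_mem_nil, false_iff]
    rintro ⟨m, hm1, hm2, _, _⟩
    exact h (le_trans (pv_sq_le k m (by omega) hm1) hm2)

theorem pairwise_pvJs (n k i : Int) (hk : 1 ≤ k) :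
    (pvJs n k i).Pairwise (· < ·) := by
  induction k using pvJs.induct n with
  | case1 k h ih =>
    rw [pvJs, dif_pos h]
    refine List.pairwise_append.mpr ⟨?_, ih (by omega), ?_⟩
    · split <;> simp
    · intro a ha b hb
      rw [List.mem_ite_nil_right, List.mem_singleton] at ha
      obtain ⟨_, rfl⟩ := ha
      obtain ⟨m, hm1, _, _, rfl⟩ := (mem_pvJs n (k + 1) i b (by omega)).mp hb
      have := pv_sq_lt k m (by omega) (by omega)
      omega
  | case2 k h => rw [pvJs, dif_neg h]; exact List.Pairwise.nil

-- membership in A's inner list ↔ membership in the j-list pvFill writes for node i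
theorem inner_mem_iff (n i x : Int) (hi1 : 1 ≤ i) (hi2 : i ≤ n) :
    (x ∈ ((pvSquaresLoop n 1).filter
            (fun s => decide (s > i ∧ s - i ≤ n ∧ s - i ≠ i))).map (fun s => s - i))
    ↔ x ∈ pvJs n 1 i := by
  rw [mem_pvJs n 1 i x (le_refl _)]
  simp only [List.mem_map, List.mem_filter, decide_eq_true_eq]
  constructor
  · rintro ⟨s, ⟨hs, hcond⟩, rfl⟩
    obtain ⟨k, hk1, rfl, hk3⟩ := (mem_pvSquaresLoop n 1 s (le_refl _)).mp hs
    exact ⟨k, hk1, hk3, by omega, rfl⟩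
  · rintro ⟨m, hm1, hm2, hm3, rfl⟩
    refine ⟨m * m, ⟨(mem_pvSquaresLoop n 1 (m * m) (le_refl _)).mpr ⟨m, hm1, rfl, hm2⟩, ?_⟩, rfl⟩
    omega

-- getD through a fold of guarded modifies over distinct keys
theorem pv_getD_foldl_modify (P : Int → Prop) [DecidablePred P]
    (f : Int → PySem.Set Int → PySem.Set Int) :
    ∀ (l : List Int) (d : PySem.Dict Int (PySem.Set Int)) (i : Int), l.Nodup →
      ((l.foldl (fun d i' => if _g : P i' then d.modify i' PySem.Set.empty (f i') else d) d).getD i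
          PySem.Set.empty)
        = if i ∈ l ∧ P i then f i (d.getD i PySem.Set.empty) else d.getD i PySem.Set.empty := by
  intro l
  induction l with
  | nil => intro d i _; simp
  | cons x l ih =>
    intro d i hnd
    have hx : x ∉ l := (List.nodup_cons.mp hnd).1
    rw [List.foldl_cons, ih _ i (List.nodup_cons.mp hnd).2]
    by_cases hPx : P x
    · rw [dif_pos hPx, PySem.Dict.getD_modify]
      by_cases hix : i = x
      · subst hix
        simp [hx, hPx]
      · simp [hix, List.mem_cons]
    · rw [dif_neg hPx]
      by_cases hix : i = x
      · subst hix
        simp [hPx, List.mem_cons]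
      · simp [hix, List.mem_cons]

theorem getD_pvFill (n k : Int) (d : PySem.Dict Int (PySem.Set Int)) (i : Int) :
    (pvFill n k d).getD i PySem.Set.empty
      = (pvJs n k i).foldl PySem.Set.add (d.getD i PySem.Set.empty) := by
  induction k, d using pvFill.induct n with
  | case1 k d h ih =>
    rw [pvFill, dif_pos h, ih]
    conv_rhs => rw [pvJs, dif_pos h]
    rw [List.foldl_append]
    congr 1
    rw [pv_getD_foldl_modify (fun i' => k * k - i' ≠ i') (fun i' s => PySem.Set.add s (k * k - i'))
          _ d i (PySem.List.nodup_pyRange_one _ _)]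
    simp only [PySem.List.mem_pyRange_one]
    split_ifs with h1 h2 h2 <;> simp_all
  | case2 k d h => rw [pvFill, dif_neg h, pvJs, dif_neg h]; rfl

-- an insertion-ordered dict with distinct keys is the map of getD over its keys
theorem pv_items_eq_map (d : PySem.Dict Int (PySem.Set Int)) (h : d.keys.Nodup) :
    d.items = d.keys.map (fun k => (k, d.getD k PySem.Set.empty)) := by
  refine List.ext_getElem (by simp [PySem.Dict.keys]) (fun m hm hm' => ?_)
  simp only [PySem.Dict.keys, List.getElem_map]
  have hmem : d.items[m] ∈ d.items := List.getElem_mem _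
  have : d.getD d.items[m].1 PySem.Set.empty = d.items[m].2 :=
    PySem.Dict.getD_of_mem_items d hmem h PySem.Set.empty
  rw [this]

-- keys are unchanged through the guarded-modify fold (all touched keys present)
theorem pv_keys_foldl_modify (P : Int → Prop) [DecidablePred P]
    (f : Int → PySem.Set Int → PySem.Set Int) :
    ∀ (l : List Int) (d : PySem.Dict Int (PySem.Set Int)), (∀ x ∈ l, x ∈ d.keys) →
      (l.foldl (fun d i' => if _g : P i' then d.modify i' PySem.Set.empty (f i') else d) d).keys
        = d.keys := by
  intro l
  induction l with
  | nil => intro d _; rfl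
  | cons x l ih =>
    intro d hsub
    rw [List.foldl_cons]
    by_cases hPx : P x
    · rw [dif_pos hPx]
      have hk : (d.modify x PySem.Set.empty (f x)).keys = d.keys := by
        rw [PySem.Dict.keys_modify]
        have hc : d.contains x = true := by
          rw [PySem.Dict.contains_iff_mem_keys]; exact hsub x (List.mem_cons_self)
        exact PySem.Dict.keys_insert_of_contains (d := d)
          (v := f x (d.getD x PySem.Set.empty)) hc
      rw [ih _ (fun y hy => by rw [hk]; exact hsub y (List.mem_cons_of_mem _ hy)), hk]
    · rw [dif_neg hPx]
      exact ih _ (fun y hy => hsub y (List.mem_cons_of_mem _ hy))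

theorem keys_pvFill (n k : Int) (d : PySem.Dict Int (PySem.Set Int))
    (hd : d.keys = PySem.List.pyRange 1 (n + 1) 1) :
    (pvFill n k d).keys = d.keys := by
  induction k, d using pvFill.induct n with
  | case1 k d h ih =>
    rw [pvFill, dif_pos h]
    have hkeys := pv_keys_foldl_modify (fun i' => k * k - i' ≠ i')
      (fun i' s => PySem.Set.add s (k * k - i'))
      (PySem.List.pyRange (max 1 (k * k - n)) (min n (k * k - 1) + 1) 1) d
      (fun x hx => by
        rw [hd, PySem.List.mem_pyRange_one]
        rw [PySem.List.mem_pyRange_one] at hx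
        omega)
    rw [ih (by rw [hkeys, hd]), hkeys]
  | case2 k d h => rw [pvFill, dif_neg h]

-- ===== VERDICT (by name: the statement is the Claim_ definition above) =====
theorem generateSquareGraph_spec : Claim_equal_generateSquareGraph := by
  intro n _
  unfold Spec_generateSquareGraph
  simp only [generateSquareGraph, generateSquareGraph_alt]
  rw [PySem.Dict.items_foldl_insert_fresh (l := PySem.List.pyRange 1 (n + 1) 1)
        (k := fun i => i)
        (v := fun i => PySem.Set.ofList ((pvSquaresLoop n 1).foldl
          (fun l s => if s > i ∧ s - i ≤ n ∧ s - i ≠ i then l ++ [s - i] else l) []))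
        (d := PySem.Dict.empty)
        (by intro a _; exact PySem.Dict.contains_empty a)
        (by simpa using PySem.List.nodup_pyRange_one 1 (n + 1))]
  rw [show (PySem.Dict.empty : PySem.Dict Int (List Int)).items = [] from rfl, List.nil_append]
  have hinit : ((PySem.List.pyRange 1 (n + 1) 1).foldl
      (fun d i => d.insert i PySem.Set.empty)
      (PySem.Dict.empty : PySem.Dict Int (PySem.Set Int))).items
      = (PySem.List.pyRange 1 (n + 1) 1).map
          (fun i => (i, (PySem.Set.empty : PySem.Set Int))) := by
    rw [PySem.Dict.items_foldl_insert_fresh (l := PySem.List.pyRange 1 (n + 1) 1)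
          (k := fun i => i) (v := fun _ => PySem.Set.empty) (d := PySem.Dict.empty)
          (by intro a _; exact PySem.Dict.contains_empty a)
          (by simpa using PySem.List.nodup_pyRange_one 1 (n + 1))]
    rw [show (PySem.Dict.empty : PySem.Dict Int (List Int)).items = [] from rfl, List.nil_append]
  have hkeys0 : ((PySem.List.pyRange 1 (n + 1) 1).foldl
      (fun d i => d.insert i PySem.Set.empty)
      (PySem.Dict.empty : PySem.Dict Int (PySem.Set Int))).keys
      = PySem.List.pyRange 1 (n + 1) 1 := by
    simp only [PySem.Dict.keys, hinit, List.map_map]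
    simp [Function.comp_def]
  have hkeys := keys_pvFill n 1 _ hkeys0
  rw [pv_items_eq_map _ (by rw [hkeys, hkeys0]; exact PySem.List.nodup_pyRange_one _ _),
      hkeys, hkeys0]
  refine List.map_congr_left (fun i hi => ?_)
  have hmem := (PySem.List.mem_pyRange_one).mp hi
  have hgd0 : ((PySem.List.pyRange 1 (n + 1) 1).foldl
      (fun d i => d.insert i PySem.Set.empty)
      (PySem.Dict.empty : PySem.Dict Int (PySem.Set Int))).getD i PySem.Set.empty
      = (PySem.Set.empty : PySem.Set Int) := by
    exact PySem.Dict.getD_of_mem_items _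
      (by rw [hinit]; exact List.mem_map.mpr ⟨i, hi, rfl⟩)
      (by rw [hkeys0]; exact PySem.List.nodup_pyRange_one _ _) _
  rw [getD_pvFill, hgd0]
  have hlists : (pvSquaresLoop n 1).foldl
      (fun l s => if s > i ∧ s - i ≤ n ∧ s - i ≠ i then l ++ [s - i] else l) []
      = pvJs n 1 i := by
    rw [innerA_eq]
    exact eq_of_pairwise_lt_of_mem_iff _ _ (pairwise_innerA n i) (pairwise_pvJs n 1 i (le_refl _))
      (fun a => inner_mem_iff n i a (by omega) (by omega))
  rw [hlists]
  simp [PySem.Set.ofList_eq_foldl, PySem.Set.empty]
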